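-- pv_equiv track=rewrite | github.com/cxz5309/coding-test-Team | 이성묵/DP/2208#보석줍기/recursion.py | solution
-- ===== SOURCE A (Python) =====
-- def solution(n, m, a):
--     cache = {}
--
--     def dp(start: int):
--         if start == n - 1:
--             return a[-1]
--         if start >= n:
--             return 0
--         if start not in cache:
--             cache[start] = max(a[start], a[start] + dp(start + 1), 0)
--         return cache[start]
--
--     r = []
--     p = sum(a[:m])
--     i = m
--     while 1:
--         r.append(max(p, dp(i) + p))
--         if i >= n: break
--         p += a[i] - a[i - m]
--         i += 1
--
--     return max(r)
-- ===== SOURCE B (Python) =====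
-- def solution(n, m, a):
--     # Bottom-up suffix table replacing A's memoized recursion, plus a running
--     # maximum instead of collecting a list.
--     dp = {}
--     if m <= n - 1:
--         v = a[-1]
--         dp[n - 1] = v
--         for s in range(n - 2, m - 1, -1):
--             v = max(a[s], a[s] + v, 0)
--             dp[s] = v
--     p = sum(a[:m])
--     ans = max(p, dp.get(m, 0) + p)
--     for i in range(m, n):
--         p += a[i] - a[i - m]
--         ans = max(ans, p, dp.get(i + 1, 0) + p)
--     return ans
-- ===== Notes on version B (the rewrite author's own statement) =====
-- stated objective: alternative
-- what changed: Replaces the memoized top-down dp recursion and the collect-then-max result list with a bottom-up suffix-dp dictionary built once (descending loop) plus a forward window scan keeping a running maximum.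
import Mathlib
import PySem

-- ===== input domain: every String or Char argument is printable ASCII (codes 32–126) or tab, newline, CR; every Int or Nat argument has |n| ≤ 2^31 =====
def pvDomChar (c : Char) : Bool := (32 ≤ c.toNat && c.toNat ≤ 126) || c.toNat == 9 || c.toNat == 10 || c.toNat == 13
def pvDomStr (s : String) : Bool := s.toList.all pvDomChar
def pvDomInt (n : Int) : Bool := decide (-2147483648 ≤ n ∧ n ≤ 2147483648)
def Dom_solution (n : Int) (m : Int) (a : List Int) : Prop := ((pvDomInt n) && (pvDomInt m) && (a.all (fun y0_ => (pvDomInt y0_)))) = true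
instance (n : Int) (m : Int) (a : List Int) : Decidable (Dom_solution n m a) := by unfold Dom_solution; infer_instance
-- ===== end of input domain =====

-- B replaces A's memoized top-down dp recursion and collect-then-max list with a bottom-up
-- suffix-dp dictionary plus a forward window scan keeping a running maximum (alternative decomposition).

-- ===== PORT A =====
-- dp(start): the inner memoized recursion of A (the cache only memoizes a pure function,
-- so the port is the same recursion without the cache; values are identical call for call)
def solDp (n : Int) (a : List Int) (start : Int) : Int :=
  if start = n - 1 then PySem.List.pyGetD a (-1) 0
  else if n ≤ start then 0
  else max (max (PySem.List.pyGetD a start 0) (PySem.List.pyGetD a start 0 + solDp n a (start + 1))) 0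
termination_by (n - start).toNat
decreasing_by omega

-- the while-loop of A, building the list r
def solLoop (n : Int) (m : Int) (a : List Int) (i : Int) (p : Int) (r : List Int) : List Int :=
  if n ≤ i then r ++ [max p (solDp n a i + p)]
  else solLoop n m a (i + 1) (p + PySem.List.pyGetD a i 0 - PySem.List.pyGetD a (i - m) 0)
         (r ++ [max p (solDp n a i + p)])
termination_by (n - i).toNat
decreasing_by omega

-- Python max(r) over a list of ints; r is nonempty on every input (the append precedes the break),
-- so the [] branch is unreachable
def pyMaxList : List Int → Int
  | [] => 0
  | h :: t => t.foldl max h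

def solution (n : Int) (m : Int) (a : List Int) : Int :=
  pyMaxList (solLoop n m a m ((PySem.List.slice a none (some m)).sum) [])

-- ===== PORT B =====
-- the bottom-up suffix-dp dictionary of B (dp = {}; descending loop filling it)
def solDpTable (n : Int) (m : Int) (a : List Int) : PySem.Dict Int Int :=
  if m ≤ n - 1 then
    let v := PySem.List.pyGetD a (-1) 0
    (((PySem.List.pyRange (n - 2) (m - 1) (-1)).foldl
        (fun st s =>
          let w := max (max (PySem.List.pyGetD a s 0) (PySem.List.pyGetD a s 0 + st.2)) 0
          (st.1.insert s w, w))
        ((PySem.Dict.empty).insert (n - 1) v, v))).1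
  else PySem.Dict.empty

def solution_alt (n : Int) (m : Int) (a : List Int) : Int :=
  let dp := solDpTable n m a
  let p := (PySem.List.slice a none (some m)).sum
  let ans := max p (dp.getD m 0 + p)
  ((PySem.List.pyRange m n 1).foldl
      (fun st i =>
        let p' := st.2 + PySem.List.pyGetD a i 0 - PySem.List.pyGetD a (i - m) 0
        (max (max st.1 p') (dp.getD (i + 1) 0 + p'), p'))
      (ans, p)).1

-- ===== PRECONDITION & SPEC =====
-- Pre_ is exactly the set of inputs on which the Python A returns normally: for m < n, A indexes
-- a[-1], a[m..n-2], a[m..n-1] and a[0..n-1-m] (negative indices wrap), raising IndexError outside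
-- these bounds; for m ≥ n, A never indexes a and always returns.
def Pre_solution (n : Int) (m : Int) (a : List Int) : Prop :=
  n ≤ m ∨ (a ≠ [] ∧ -(a.length : Int) ≤ m ∧ n - 1 < (a.length : Int) ∧ n - 1 - m < (a.length : Int))
instance (n : Int) (m : Int) (a : List Int) : Decidable (Pre_solution n m a) := by
  unfold Pre_solution; infer_instance
def pvWitness_solution : Int × Int × List Int := (3, 1, [1, -2, 3])

def Spec_solution (n : Int) (m : Int) (a : List Int) (out : Int) : Prop := out = solution_alt n m a
instance (n : Int) (m : Int) (a : List Int) (out : Int) : Decidable (Spec_solution n m a out) := by unfold Spec_solution; infer_instance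

-- ===== CLAIM (what is proved, stated in full; the proofs are below) =====
def Claim_equal_solution : Prop := ∀ (n : Int) (m : Int) (a : List Int), Dom_solution n m a → Pre_solution n m a → Spec_solution n m a (solution n m a)

-- ===== LEMMAS AND PROOFS =====

lemma solDp_base (n : Int) (a : List Int) : solDp n a (n - 1) = PySem.List.pyGetD a (-1) 0 := by
  rw [solDp]; simp

lemma solDp_top (n : Int) (a : List Int) (i : Int) (h : n ≤ i) : solDp n a i = 0 := by
  rw [solDp]
  have h1 : ¬ i = n - 1 := by omega
  simp [h1, h]

lemma solDp_step (n : Int) (a : List Int) (i : Int) (h : i ≤ n - 2) :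
    solDp n a i
      = max (max (PySem.List.pyGetD a i 0) (PySem.List.pyGetD a i 0 + solDp n a (i + 1))) 0 := by
  rw [solDp]
  have h1 : ¬ i = n - 1 := by omega
  have h2 : ¬ n ≤ i := by omega
  simp [h1, h2]

lemma foldDict (n m : Int) (a : List Int) :
    ∀ (k : Nat) (t : Int) (d : PySem.Dict Int Int),
      (t - (m - 1)).toNat ≤ k → m - 1 ≤ t → t ≤ n - 2 →
      (∀ i : Int, d.getD i 0 = if t + 1 ≤ i ∧ i ≤ n - 1 then solDp n a i else 0) →
      ∀ i : Int,
        (((PySem.List.pyRange t (m - 1) (-1)).foldl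
            (fun st s =>
              let w := max (max (PySem.List.pyGetD a s 0) (PySem.List.pyGetD a s 0 + st.2)) 0
              (st.1.insert s w, w))
            (d, solDp n a (t + 1))).1).getD i 0
          = if m ≤ i ∧ i ≤ n - 1 then solDp n a i else 0 := by
  intro k
  induction k with
  | zero =>
    intro t d hk h1 h2 hd i
    have ht : t = m - 1 := by omega
    subst ht
    rw [PySem.List.pyRange_neg_one_eq_nil le_rfl]
    simpa using hd i
  | succ k ih =>
    intro t d hk h1 h2 hd i
    by_cases ht : t = m - 1
    · subst ht
      rw [PySem.List.pyRange_neg_one_eq_nil le_rfl]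
      simpa using hd i
    · rw [PySem.List.pyRange_neg_one_cons (by omega : m - 1 < t)]
      rw [List.foldl_cons]
      dsimp only
      have hw : max (max (PySem.List.pyGetD a t 0) (PySem.List.pyGetD a t 0 + solDp n a (t + 1))) 0
          = solDp n a t := (solDp_step n a t h2).symm
      rw [hw]
      have heq : solDp n a t = solDp n a ((t - 1) + 1) := by norm_num
      rw [show (d.insert t (solDp n a t), solDp n a t)
            = (d.insert t (solDp n a t), solDp n a ((t - 1) + 1)) by rw [← heq]]
      exact ih (t - 1) (d.insert t (solDp n a t)) (by omega) (by omega) (by omega)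
        (by
          intro j
          rw [PySem.Dict.getD_insert]
          by_cases hj : j = t
          · rw [if_pos hj, hj, if_pos (show (t - 1) + 1 ≤ t ∧ t ≤ n - 1 by omega)]
          · rw [if_neg hj, hd j]
            by_cases hc : (t - 1) + 1 ≤ j ∧ j ≤ n - 1
            · rw [if_pos hc, if_pos (by omega)]
            · rw [if_neg hc, if_neg (by omega)]) i

lemma solDpTable_getD (n m : Int) (a : List Int) (h : m ≤ n - 1) :
    ∀ i : Int, (solDpTable n m a).getD i 0
      = if m ≤ i ∧ i ≤ n - 1 then solDp n a i else 0 := by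
  intro i
  rw [solDpTable, if_pos h]
  have hbase : PySem.List.pyGetD a (-1) 0 = solDp n a ((n - 2) + 1) := by
    rw [show (n - 2) + 1 = n - 1 by ring, solDp_base]
  rw [hbase]
  exact foldDict n m a (((n - 2) - (m - 1)).toNat) (n - 2)
    ((PySem.Dict.empty).insert (n - 1) (solDp n a ((n - 2) + 1)))
    le_rfl (by omega) le_rfl
    (by
      intro j
      rw [PySem.Dict.getD_insert]
      by_cases hj : j = n - 1
      · subst hj
        rw [if_pos rfl, if_pos ⟨by omega, le_rfl⟩]
        rw [show (n - 2) + 1 = n - 1 by ring]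
      · rw [if_neg hj, PySem.Dict.getD_empty]
        rw [if_neg (by omega)]) i

lemma dict_bridge (n m : Int) (a : List Int) (hmn : m < n) (i : Int)
    (hi : m ≤ i) (hi' : i ≤ n) :
    (solDpTable n m a).getD i 0 = solDp n a i := by
  rw [solDpTable_getD n m a (by omega)]
  by_cases h : i ≤ n - 1
  · rw [if_pos ⟨hi, h⟩]
  · rw [if_neg (by omega), solDp_top n a i (by omega)]

lemma solLoop_acc (n m : Int) (a : List Int) :
    ∀ (k : Nat) (i p : Int) (r : List Int), (n - i).toNat ≤ k →
      solLoop n m a i p r = r ++ solLoop n m a i p [] := by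
  intro k
  induction k with
  | zero =>
    intro i p r hk
    have h : n ≤ i := by omega
    rw [solLoop, if_pos h]
    conv_rhs => rw [solLoop]
    rw [if_pos h]
    simp
  | succ k ih =>
    intro i p r hk
    by_cases h : n ≤ i
    · rw [solLoop, if_pos h]
      conv_rhs => rw [solLoop]
      rw [if_pos h]
      simp
    · rw [solLoop, if_neg h]
      conv_rhs => rw [solLoop]
      rw [if_neg h]
      rw [ih (i + 1) _ (r ++ [max p (solDp n a i + p)]) (by omega),
          ih (i + 1) _ ([] ++ [max p (solDp n a i + p)]) (by omega)]
      simp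

lemma solLoop_cons (n m : Int) (a : List Int) (i p : Int) :
    solLoop n m a i p []
      = max p (solDp n a i + p)
        :: (if n ≤ i then []
            else solLoop n m a (i + 1)
                   (p + PySem.List.pyGetD a i 0 - PySem.List.pyGetD a (i - m) 0) []) := by
  rw [solLoop]
  by_cases h : n ≤ i
  · simp [h]
  · rw [if_neg h, if_neg h]
    rw [solLoop_acc n m a ((n - (i + 1)).toNat) (i + 1) _ _ le_rfl]
    simp

lemma winFold (n m : Int) (a : List Int) (hmn : m < n) :
    ∀ (k : Nat) (i p acc : Int), (n - i).toNat ≤ k → m ≤ i → i ≤ n →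
      ((PySem.List.pyRange i n 1).foldl
          (fun st j =>
            let p' := st.2 + PySem.List.pyGetD a j 0 - PySem.List.pyGetD a (j - m) 0
            (max (max st.1 p') ((solDpTable n m a).getD (j + 1) 0 + p'), p'))
          (max acc (max p ((solDpTable n m a).getD i 0 + p)), p)).1
        = (solLoop n m a i p []).foldl max acc := by
  intro k
  induction k with
  | zero =>
    intro i p acc hk him hin
    have h : n ≤ i := by omega
    rw [PySem.List.pyRange_one_eq_nil h]
    rw [solLoop_cons, if_pos h]
    rw [dict_bridge n m a hmn i him hin]
    simp
  | succ k ih =>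
    intro i p acc hk him hin
    by_cases h : n ≤ i
    · rw [PySem.List.pyRange_one_eq_nil h]
      rw [solLoop_cons, if_pos h]
      rw [dict_bridge n m a hmn i him hin]
      simp
    · rw [PySem.List.pyRange_one_cons (by omega : i < n)]
      rw [List.foldl_cons]
      dsimp only
      rw [solLoop_cons, if_neg h, List.foldl_cons]
      rw [dict_bridge n m a hmn i him (by omega)]
      have hassoc :
          max (max (max acc (max p (solDp n a i + p)))
                (p + PySem.List.pyGetD a i 0 - PySem.List.pyGetD a (i - m) 0))
              ((solDpTable n m a).getD (i + 1) 0
                + (p + PySem.List.pyGetD a i 0 - PySem.List.pyGetD a (i - m) 0))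
          = max (max acc (max p (solDp n a i + p)))
              (max (p + PySem.List.pyGetD a i 0 - PySem.List.pyGetD a (i - m) 0)
                ((solDpTable n m a).getD (i + 1) 0
                  + (p + PySem.List.pyGetD a i 0 - PySem.List.pyGetD a (i - m) 0))) :=
        max_assoc _ _ _
      rw [hassoc]
      exact ih (i + 1) _ (max acc (max p (solDp n a i + p))) (by omega) (by omega) (by omega)

-- ===== VERDICT (by name: the statement is the Claim_ definition above) =====
theorem solution_spec : Claim_equal_solution := by
  intro n m a _hdom _hpre
  unfold Spec_solution
  show solution n m a = solution_alt n m a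
  rw [solution, solution_alt]
  set p0 := (PySem.List.slice a none (some m)).sum with hp0
  by_cases hmn : m < n
  · have hcons := solLoop_cons n m a m p0
    have hbr := dict_bridge n m a hmn m le_rfl (by omega)
    dsimp only
    have hwin := winFold n m a hmn ((n - m).toNat) m p0
      (max p0 ((solDpTable n m a).getD m 0 + p0)) le_rfl le_rfl (by omega)
    rw [max_self] at hwin
    rw [hwin]
    rw [hcons]
    rw [pyMaxList, List.foldl_cons, hbr, max_self]
  · -- m ≥ n: the dp table is empty and both sides are p0 ⊔ (0 + p0)
    have h : n ≤ m := by omega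
    rw [solLoop, if_pos h, solDp_top n a m h]
    have htab : solDpTable n m a = PySem.Dict.empty := by
      rw [solDpTable, if_neg (by omega)]
    dsimp only
    rw [htab, PySem.List.pyRange_one_eq_nil h]
    simp [pyMaxList]
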